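-- pv_equiv track=rewrite | github.com/shriyans-h/ee1030-2025 | EE25BTECH11041/Assignments/matgeo/q13-5.13.66/a/code/figure.py | solve_part_a
-- ===== SOURCE A (Python) =====
-- def solve_part_a(p):
--     """
--     Solves part (a) by checking every possible matrix of the form [[a, b], [c, a]].
--
--     It counts the number of matrices where:
--     1. The determinant (a^2 - bc) is divisible by p.
--     2. The matrix is either symmetric (c=b) or skew-symmetric (a=0, c=-b).
--
--     Args:
--         p: An odd prime number.
--
--     Returns:
--         The total count of such matrices.
--     """
--     # A set is used to store unique matrices. This is important because the
--     # zero matrix is both symmetric and skew-symmetric, and we must not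
--     # double-count it. We store a string representation of each matrix.
--     valid_matrices = set()
--
--     # Iterate through all possible values for a, b, and c
--     for a in range(p):
--         for b in range(p):
--             for c in range(p):
--                 # Condition 1: Determinant is divisible by p
--                 determinant = a**2 - b * c
--                 if determinant % p == 0:
--                     # Condition 2: Matrix is either symmetric or skew-symmetric
--                     is_symmetric = (c == b)
--                     # For skew-symmetric, c = -b mod p. In Python, (-b % p) handles this correctly.
--                     is_skew_symmetric = (a == 0 and c == (-b % p))
--
--                     if is_symmetric or is_skew_symmetric:
--                         matrix_str = f"[[{a}, {b}], [{c}, {a}]]"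
--                         valid_matrices.add(matrix_str)
--
--     return len(valid_matrices)
-- ===== SOURCE B (Python) =====
-- def solve_part_a(p):
--     """Same count, but without the inner loop over c: for each (a, b) the only
--     candidate matrices are the symmetric one (c = b) and, when a == 0, the
--     skew-symmetric one (c = (-b) % p), so we enumerate only those."""
--     if p <= 0:
--         return 0
--     count = 0
--     # symmetric matrices: c = b, determinant a^2 - b^2 divisible by p
--     for a in range(p):
--         for b in range(p):
--             if (a * a - b * b) % p == 0:
--                 count += 1
--     # skew-symmetric matrices not already counted as symmetric:
--     # a = 0, c = (-b) % p with c != b, determinant -b*c divisible by p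
--     for b in range(p):
--         c = (-b) % p
--         if c != b and (b * c) % p == 0:
--             count += 1
--     return count
-- ===== Notes on version B (the rewrite author's own statement) =====
-- stated objective: faster
-- what changed: B drops the inner loop over c entirely: for each (a,b) only c=b (symmetric) and, for a=0, c=(-b)%p (skew, when distinct) can be counted, so B counts those two families directly instead of enumerating all p^3 matrices into a set of strings.
import Mathlib
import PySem

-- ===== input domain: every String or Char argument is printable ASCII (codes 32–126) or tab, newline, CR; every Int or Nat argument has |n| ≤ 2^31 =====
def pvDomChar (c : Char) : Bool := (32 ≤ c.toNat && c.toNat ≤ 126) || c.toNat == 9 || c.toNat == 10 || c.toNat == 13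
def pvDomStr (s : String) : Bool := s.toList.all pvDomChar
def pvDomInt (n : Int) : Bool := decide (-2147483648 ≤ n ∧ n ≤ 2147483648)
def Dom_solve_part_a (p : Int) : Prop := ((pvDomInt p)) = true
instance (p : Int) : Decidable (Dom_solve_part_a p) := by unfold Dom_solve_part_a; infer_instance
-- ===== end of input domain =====

-- B replaces A's O(p^3) enumeration of all (a,b,c) by counting only the two candidate
-- families per (a,b) — symmetric c=b and, for a=0, skew c=(-b)%p — in O(p^2).

-- ===== PORT A =====
-- the f-string "[[{a}, {b}], [{c}, {a}]]", modelled on the List Char side (PySem convention)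
def pvEnc (a b c : Int) : List Char :=
  ['[', '['] ++ PySem.Int.toChars a ++ [',', ' '] ++ PySem.Int.toChars b
    ++ [']', ',', ' ', '['] ++ PySem.Int.toChars c ++ [',', ' '] ++ PySem.Int.toChars a ++ [']', ']']

def solve_part_a (p : Int) : Int :=
  let valid : PySem.Set (List Char) :=
    (PySem.List.pyRange 0 p 1).foldl (fun s a =>
      (PySem.List.pyRange 0 p 1).foldl (fun s b =>
        (PySem.List.pyRange 0 p 1).foldl (fun s c =>
          let determinant := a ^ 2 - b * c
          if PySem.Int.mod determinant p = 0 then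
            if c = b ∨ (a = 0 ∧ c = PySem.Int.mod (-b) p) then
              PySem.Set.add s (pvEnc a b c)
            else s
          else s) s) s) PySem.Set.empty
  PySem.Set.len valid

-- ===== PORT B =====
def solve_part_a_alt (p : Int) : Int :=
  if p ≤ 0 then 0
  else
    let count1 := (PySem.List.pyRange 0 p 1).foldl (fun cnt a =>
      (PySem.List.pyRange 0 p 1).foldl (fun cnt b =>
        if PySem.Int.mod (a * a - b * b) p = 0 then cnt + 1 else cnt) cnt) 0
    (PySem.List.pyRange 0 p 1).foldl (fun cnt b =>
      let c := PySem.Int.mod (-b) p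
      if c ≠ b ∧ PySem.Int.mod (b * c) p = 0 then cnt + 1 else cnt) count1

-- ===== PRECONDITION & SPEC =====
def Spec_solve_part_a (p : Int) (out : Int) : Prop := out = solve_part_a_alt p
instance (p : Int) (out : Int) : Decidable (Spec_solve_part_a p out) := by unfold Spec_solve_part_a; infer_instance

-- ===== CLAIM (what is proved, stated in full; the proofs are below) =====
def Claim_equal_solve_part_a : Prop := ∀ (p : Int), Dom_solve_part_a p → Spec_solve_part_a p (solve_part_a p)

-- ===== LEMMAS AND PROOFS =====

def pvDigits : Nat → List Char := fun n =>
  if _h : n < 10 then [Nat.digitChar n]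
  else pvDigits (n / 10) ++ [Nat.digitChar (n % 10)]
decreasing_by exact Nat.div_lt_self (by omega) (by omega)

lemma pvDigits_eq (n : Nat) : pvDigits n =
    if n < 10 then [Nat.digitChar n] else pvDigits (n / 10) ++ [Nat.digitChar (n % 10)] := by
  rw [pvDigits]
  split_ifs <;> rfl

lemma pvToDigitsCore_eq : ∀ (f n : Nat) (ds : List Char), n < f →
    Nat.toDigitsCore 10 f n ds = pvDigits n ++ ds := by
  intro f
  induction f with
  | zero => omega
  | succ f ih =>
    intro n ds h
    rw [Nat.toDigitsCore]
    by_cases h10 : n < 10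
    · have : n / 10 = 0 := Nat.div_eq_of_lt h10
      simp [this, pvDigits_eq n, h10, Nat.mod_eq_of_lt h10]
    · have hne : ¬ (n / 10 = 0) := by
        intro hc; exact h10 (by omega)
      simp only [hne, if_false]
      rw [ih _ _ (by omega), pvDigits_eq n, if_neg h10]
      simp

lemma pvToDigits_eq (n : Nat) : Nat.toDigits 10 n = pvDigits n := by
  rw [Nat.toDigits]
  simpa using pvToDigitsCore_eq (n + 1) n [] (by omega)

lemma pvVal_aux : ∀ (n a : Nat), (pvDigits n).foldl (fun a c => 10 * a + (c.toNat - 48)) a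
    = a * 10 ^ (pvDigits n).length + n := by
  intro n
  induction n using Nat.strong_induction_on with
  | _ n ih =>
    intro a
    by_cases h10 : n < 10
    · rw [pvDigits_eq n, if_pos h10]
      simp [List.foldl]
      interval_cases n <;> simp [Nat.digitChar] <;> omega
    · rw [pvDigits_eq n, if_neg h10, List.foldl_append,
        ih (n / 10) (Nat.div_lt_self (by omega) (by omega)) a]
      simp [List.foldl]
      have hm : (Nat.digitChar (n % 10)).toNat - 48 = n % 10 := by
        have : n % 10 < 10 := Nat.mod_lt _ (by omega)
        interval_cases h : n % 10 <;> simp [Nat.digitChar]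
      rw [hm]
      ring_nf
      omega

lemma pvDigits_inj {m n : Nat} (h : pvDigits m = pvDigits n) : m = n := by
  have hm := pvVal_aux m 0
  have hn := pvVal_aux n 0
  rw [h] at hm
  omega

lemma pvDigits_digit : ∀ (n : Nat), ∀ c ∈ pvDigits n, c.isDigit = true := by
  intro n
  induction n using Nat.strong_induction_on with
  | _ n ih =>
    intro c hc
    by_cases h10 : n < 10
    · rw [pvDigits_eq n, if_pos h10] at hc
      simp at hc
      subst hc
      interval_cases n <;> decide
    · rw [pvDigits_eq n, if_neg h10] at hc
      rcases List.mem_append.mp hc with hc | hc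
      · exact ih (n / 10) (Nat.div_lt_self (by omega) (by omega)) c hc
      · simp at hc
        subst hc
        have : n % 10 < 10 := Nat.mod_lt _ (by omega)
        interval_cases h : n % 10 <;> decide

lemma pvToChars_nonneg {n : Int} (h : 0 ≤ n) : PySem.Int.toChars n = pvDigits n.toNat := by
  rw [PySem.Int.toChars]
  rw [if_neg (by omega)]
  exact pvToDigits_eq n.toNat

-- split a 'digits then a non-digit' concatenation
lemma pvSplit : ∀ (ds1 ds2 r1 r2 : List Char) (c1 c2 : Char),
    (∀ c ∈ ds1, c.isDigit = true) → (∀ c ∈ ds2, c.isDigit = true) →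
    c1.isDigit = false → c2.isDigit = false →
    ds1 ++ c1 :: r1 = ds2 ++ c2 :: r2 → ds1 = ds2 ∧ c1 = c2 ∧ r1 = r2 := by
  intro ds1
  induction ds1 with
  | nil =>
    intro ds2 r1 r2 c1 c2 _ h2 hc1 hc2 heq
    cases ds2 with
    | nil => simpa using heq
    | cons d ds2 =>
      simp at heq
      exfalso
      have := h2 d (by simp)
      rw [heq.1] at hc1
      simp [this] at hc1
  | cons d ds1 ih =>
    intro ds2 r1 r2 c1 c2 h1 h2 hc1 hc2 heq
    cases ds2 with
    | nil =>
      simp at heq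
      exfalso
      have := h1 d (by simp)
      rw [← heq.1] at hc2
      simp [this] at hc2
    | cons e ds2 =>
      simp at heq
      obtain ⟨hde, heq⟩ := heq
      obtain ⟨ha, hb, hc⟩ := ih ds2 r1 r2 c1 c2 (fun c hc => h1 c (by simp [hc]))
        (fun c hc => h2 c (by simp [hc])) hc1 hc2 heq
      exact ⟨by simp [hde, ha], hb, hc⟩

lemma pvEnc_inj {a b c a' b' c' : Int} (ha : 0 ≤ a) (hb : 0 ≤ b) (hc : 0 ≤ c)
    (ha' : 0 ≤ a') (hb' : 0 ≤ b') (hc' : 0 ≤ c')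
    (h : pvEnc a b c = pvEnc a' b' c') : a = a' ∧ b = b' ∧ c = c' := by
  unfold pvEnc at h
  rw [pvToChars_nonneg ha, pvToChars_nonneg hb, pvToChars_nonneg hc,
      pvToChars_nonneg ha', pvToChars_nonneg hb', pvToChars_nonneg hc'] at h
  simp only [List.append_assoc, List.cons_append, List.nil_append, List.cons.injEq, true_and] at h
  obtain ⟨hA, h⟩ := pvSplit _ _ _ _ _ _ (pvDigits_digit _) (pvDigits_digit _) (by decide) (by decide) h
  replace h := h.2
  simp only [List.cons.injEq, true_and] at h
  obtain ⟨hB, h⟩ := pvSplit _ _ _ _ _ _ (pvDigits_digit _) (pvDigits_digit _) (by decide) (by decide) h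
  replace h := h.2
  simp only [List.cons.injEq, true_and] at h
  obtain ⟨hC, _⟩ := pvSplit _ _ _ _ _ _ (pvDigits_digit _) (pvDigits_digit _) (by decide) (by decide) h
  refine ⟨?_, ?_, ?_⟩ <;> [skip; skip; skip]
  · have := pvDigits_inj hA; omega
  · have := pvDigits_inj hB; omega
  · have := pvDigits_inj hC; omega

def pvEncT (t : Int × Int × Int) : List Char := pvEnc t.1 t.2.1 t.2.2

def pvCondB (p : Int) (t : Int × Int × Int) : Bool :=
  decide (PySem.Int.mod (t.1 ^ 2 - t.2.1 * t.2.2) p = 0 ∧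
    (t.2.2 = t.2.1 ∨ (t.1 = 0 ∧ t.2.2 = PySem.Int.mod (-t.2.1) p)))

def pvStep (p : Int) (s : PySem.Set (List Char)) (t : Int × Int × Int) : PySem.Set (List Char) :=
  if pvCondB p t then PySem.Set.add s (pvEncT t) else s

lemma pvFoldLen (p : Int) : ∀ (ts : List (Int × Int × Int)) (s : List (List Char)),
    (ts.map pvEncT).Nodup → (∀ t ∈ ts, pvEncT t ∉ s) →
    (ts.foldl (pvStep p) s).length = s.length + ts.countP (pvCondB p) := by
  intro ts
  induction ts with
  | nil => simp
  | cons t ts ih =>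
    intro s hnd hnm
    simp only [List.map_cons, List.nodup_cons] at hnd
    simp only [List.foldl_cons, List.countP_cons]
    by_cases hcond : pvCondB p t
    · rw [pvStep, if_pos hcond]
      rw [PySem.Set.add_of_not_mem (hnm t (by simp))]
      rw [ih (s ++ [pvEncT t]) hnd.2 ?side]
      · simp [hcond]
        omega
      case side =>
        intro u hu
        simp only [List.mem_append, List.mem_singleton]
        rintro (hin | hEq)
        · exact hnm u (by simp [hu]) hin
        · exact hnd.1 (hEq ▸ List.mem_map_of_mem hu)
    · rw [pvStep, if_neg hcond]
      rw [ih s hnd.2 (fun u hu => hnm u (by simp [hu]))]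
      simp [hcond]

def pvT (p : Int) : List (Int × Int × Int) :=
  (PySem.List.pyRange 0 p 1).flatMap (fun a =>
    (PySem.List.pyRange 0 p 1).flatMap (fun b =>
      (PySem.List.pyRange 0 p 1).map (fun c => (a, b, c))))

lemma pvA_fold' (p : Int) :
    (PySem.List.pyRange 0 p 1).foldl (fun s a =>
      (PySem.List.pyRange 0 p 1).foldl (fun s b =>
        (PySem.List.pyRange 0 p 1).foldl (fun s c =>
          let determinant := a ^ 2 - b * c
          if PySem.Int.mod determinant p = 0 then
            if c = b ∨ (a = 0 ∧ c = PySem.Int.mod (-b) p) then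
              PySem.Set.add s (pvEnc a b c)
            else s
          else s) s) s) PySem.Set.empty = (pvT p).foldl (pvStep p) PySem.Set.empty := by
  unfold pvT
  rw [List.foldl_flatMap]
  congr 1
  funext s a
  rw [List.foldl_flatMap]
  congr 1
  funext s b
  rw [List.foldl_map]
  congr 1
  funext s c
  simp only [pvStep, pvCondB, pvEncT]
  split_ifs with h1 h2 h3 <;> simp_all

lemma pvA_fold (p : Int) : solve_part_a p = PySem.Set.len ((pvT p).foldl (pvStep p) PySem.Set.empty) :=
  congrArg PySem.Set.len (pvA_fold' p)

lemma pvT_mem {p : Int} {t : Int × Int × Int} (h : t ∈ pvT p) :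
    0 ≤ t.1 ∧ t.1 < p ∧ 0 ≤ t.2.1 ∧ t.2.1 < p ∧ 0 ≤ t.2.2 ∧ t.2.2 < p := by
  simp only [pvT, List.mem_flatMap, List.mem_map] at h
  obtain ⟨a, ha, b, hb, c, hc, rfl⟩ := h
  rw [PySem.List.mem_pyRange_one] at ha hb hc
  exact ⟨ha.1, ha.2, hb.1, hb.2, hc.1, hc.2⟩

lemma pvT_nodup (p : Int) : (pvT p).Nodup := by
  have heq : pvT p = (PySem.List.pyRange 0 p 1) ×ˢ ((PySem.List.pyRange 0 p 1) ×ˢ (PySem.List.pyRange 0 p 1)) := by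
    simp [pvT, SProd.sprod, List.product, List.map_flatMap, List.map_map, Function.comp_def]
  rw [heq]
  exact List.Nodup.product (PySem.List.nodup_pyRange_one 0 p)
    (List.Nodup.product (PySem.List.nodup_pyRange_one 0 p) (PySem.List.nodup_pyRange_one 0 p))

lemma pvT_map_nodup (p : Int) : ((pvT p).map pvEncT).Nodup := by
  rw [List.nodup_map_iff_inj_on (pvT_nodup p)]
  intro x hx y hy hEq
  have hxm := pvT_mem hx
  have hym := pvT_mem hy
  obtain ⟨h1, h2, h3⟩ := pvEnc_inj hxm.1 hxm.2.2.1 hxm.2.2.2.2.1 hym.1 hym.2.2.1 hym.2.2.2.2.1 hEq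
  exact Prod.ext h1 (Prod.ext h2 h3)

lemma pvA_count (p : Int) : solve_part_a p = ((pvT p).countP (pvCondB p) : Int) := by
  rw [pvA_fold]
  rw [PySem.Set.len]
  rw [pvFoldLen p (pvT p) PySem.Set.empty (pvT_map_nodup p) (by intro t ht; simp [PySem.Set.empty])]
  simp [PySem.Set.empty]

lemma pvCountP_or_disjoint {α : Type} (p q : α → Bool) : ∀ (l : List α),
    (∀ c ∈ l, ¬(p c = true ∧ q c = true)) →
    l.countP (fun c => p c || q c) = l.countP p + l.countP q := by
  intro l
  induction l with
  | nil => simp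
  | cons x l ih =>
    intro h
    simp only [List.countP_cons]
    rw [ih (fun c hc => h c (by simp [hc]))]
    have := h x (by simp)
    by_cases hp : p x <;> by_cases hq : q x <;> simp [hp, hq] at this ⊢ <;> omega

lemma pvCount_one {l : List Int} (hl : l.Nodup) {u : Int} (hu : u ∈ l) (X : Prop) [Decidable X] :
    l.countP (fun c => decide (c = u ∧ X)) = if X then 1 else 0 := by
  by_cases hX : X
  · rw [if_pos hX]
    have hfun : (fun c : Int => decide (c = u ∧ X)) = (fun c => c == u) := by
      funext c; simp only [hX, and_true]; exact Eq.symm (Bool.beq_eq_decide_eq c u)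
    rw [hfun]
    simpa [List.count] using List.count_eq_one_of_mem hl hu
  · simp [hX]

lemma pvCount_two {l : List Int} (hl : l.Nodup) {u v : Int} (hu : u ∈ l) (hv : v ∈ l)
    (hne : u ≠ v) (X Y : Prop) [Decidable X] [Decidable Y] :
    l.countP (fun c => decide ((c = u ∧ X) ∨ (c = v ∧ Y)))
      = (if X then 1 else 0) + (if Y then 1 else 0) := by
  have hfun : (fun c : Int => decide ((c = u ∧ X) ∨ (c = v ∧ Y)))
      = (fun c => decide (c = u ∧ X) || decide (c = v ∧ Y)) := by
    funext c; by_cases h1 : c = u ∧ X <;> by_cases h2 : c = v ∧ Y <;> simp [h1, h2]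
  rw [hfun, pvCountP_or_disjoint _ _ l ?disj, pvCount_one hl hu X, pvCount_one hl hv Y]
  case disj =>
    intro c _ hcontra
    simp only [decide_eq_true_eq] at hcontra
    exact hne (hcontra.1.1 ▸ hcontra.2.1 ▸ rfl)

def pvSymB (p a b : Int) : Bool := decide (PySem.Int.mod (a * a - b * b) p = 0)
def pvSkewB (p b : Int) : Bool :=
  decide (PySem.Int.mod (-b) p ≠ b ∧ PySem.Int.mod (b * PySem.Int.mod (-b) p) p = 0)

lemma pvInner (p : Int) (hp : 0 < p) (a b : Int) (hb0 : 0 ≤ b) (hbp : b < p) :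
    (PySem.List.pyRange 0 p 1).countP (fun c => pvCondB p (a, b, c)) =
      (if pvSymB p a b = true then 1 else 0) +
      (if a = 0 ∧ pvSkewB p b = true then 1 else 0) := by
  have hnd := PySem.List.nodup_pyRange_one (a := 0) (b := p)
  have hbm : b ∈ PySem.List.pyRange 0 p 1 := PySem.List.mem_pyRange_one.mpr ⟨hb0, hbp⟩
  set m := PySem.Int.mod (-b) p with hm
  have hmm : m ∈ PySem.List.pyRange 0 p 1 :=
    PySem.List.mem_pyRange_one.mpr ⟨PySem.Int.mod_nonneg _ hp, PySem.Int.mod_lt _ hp⟩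
  have hsym : (pvSymB p a b = true) ↔ (PySem.Int.mod (a ^ 2 - b * b) p = 0) := by
    simp [pvSymB]; constructor <;> intro h <;> [rwa [pow_two]; rwa [← pow_two]]
  by_cases hmb : m = b
  · have hpred : (fun c => pvCondB p (a, b, c)) =
        (fun c : Int => decide (c = b ∧ (PySem.Int.mod (a ^ 2 - b * b) p = 0 ∨
          (a = 0 ∧ PySem.Int.mod (a ^ 2 - b * m) p = 0)))) := by
      funext c
      simp only [pvCondB, decide_eq_decide]
      constructor
      · rintro ⟨hdiv, hcb | ⟨ha0, hcm⟩⟩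
        · exact ⟨hcb, Or.inl (by rwa [hcb] at hdiv)⟩
        · exact ⟨by rw [hcm, ← hm, hmb], Or.inr ⟨ha0, by rwa [hcm, ← hm] at hdiv⟩⟩
      · rintro ⟨hcb, hX | ⟨ha0, hY⟩⟩
        · subst hcb; exact ⟨hX, Or.inl rfl⟩
        · subst hcb; exact ⟨by rwa [hmb] at hY, Or.inl rfl⟩
    rw [hpred, pvCount_one hnd hbm]
    have hXY : (PySem.Int.mod (a ^ 2 - b * b) p = 0 ∨
        (a = 0 ∧ PySem.Int.mod (a ^ 2 - b * m) p = 0)) ↔ pvSymB p a b = true := by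
      rw [hsym]
      constructor
      · rintro (h | ⟨_, h⟩)
        · exact h
        · rwa [hmb] at h
      · exact Or.inl
    rw [if_congr hXY rfl rfl]
    have : ¬ (a = 0 ∧ pvSkewB p b = true) := by
      rintro ⟨_, hs⟩
      simp [pvSkewB, ← hm, hmb] at hs
    rw [if_neg this]
    simp
  · have hpred : (fun c => pvCondB p (a, b, c)) =
        (fun c : Int => decide ((c = b ∧ PySem.Int.mod (a ^ 2 - b * b) p = 0) ∨
          (c = m ∧ (a = 0 ∧ PySem.Int.mod (a ^ 2 - b * m) p = 0)))) := by
      funext c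
      simp only [pvCondB, decide_eq_decide]
      constructor
      · rintro ⟨hdiv, hcb | ⟨ha0, hcm⟩⟩
        · exact Or.inl ⟨hcb, by rwa [hcb] at hdiv⟩
        · exact Or.inr ⟨by rw [hcm], ha0, by rwa [hcm, ← hm] at hdiv⟩
      · rintro (⟨hcb, hX⟩ | ⟨hcm, ha0, hY⟩)
        · subst hcb; exact ⟨hX, Or.inl rfl⟩
        · subst hcm; exact ⟨hY, Or.inr ⟨ha0, rfl⟩⟩
    rw [hpred, pvCount_two hnd hbm hmm (fun h => hmb h.symm)]
    congr 1
    · exact if_congr hsym.symm rfl rfl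
    · apply if_congr _ rfl rfl
      constructor
      · rintro ⟨ha0, hY⟩
        refine ⟨ha0, ?_⟩
        simp only [pvSkewB, ← hm, decide_eq_true_eq]
        refine ⟨hmb, ?_⟩
        rw [ha0] at hY
        norm_num at hY
        rw [PySem.Int.mod_eq_zero_iff_dvd] at hY ⊢
        rwa [Int.dvd_neg] at hY
      · rintro ⟨ha0, hs⟩
        simp only [pvSkewB, ← hm, decide_eq_true_eq] at hs
        refine ⟨ha0, ?_⟩
        rw [ha0]
        norm_num
        rw [PySem.Int.mod_eq_zero_iff_dvd, Int.dvd_neg]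
        rw [PySem.Int.mod_eq_zero_iff_dvd] at hs
        exact hs.2

-- sum over a of (if a = 0 then K else 0) on a nodup list containing 0
lemma pvSum_ite_zero : ∀ (l : List Int), l.Nodup → (0 : Int) ∈ l → ∀ (K : Nat),
    (l.map (fun a => if a = 0 then K else 0)).sum = K := by
  intro l
  induction l with
  | nil => simp
  | cons x l ih =>
    intro hnd hmem K
    rcases List.nodup_cons.mp hnd with ⟨hx, hnd'⟩
    by_cases h0 : x = 0
    · subst h0
      simp only [List.map_cons, List.sum_cons]
      have : (l.map (fun a => if a = 0 then K else 0)).sum = 0 := by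
        apply List.sum_eq_zero
        intro y hy
        rcases List.mem_map.mp hy with ⟨a, ha, rfl⟩
        rw [if_neg]
        intro hc; subst hc; exact hx ha
      rw [this]
      simp
    · simp only [List.map_cons, List.sum_cons, if_neg h0]
      have hm : (0 : Int) ∈ l := by
        rcases List.mem_cons.mp hmem with h | h
        · exact absurd h.symm h0
        · exact h
      rw [ih hnd' hm K]
      omega

-- the Nat-level main identity, p > 0
lemma pvMain (p : Int) (hp : 0 < p) :
    (pvT p).countP (pvCondB p) =
      ((PySem.List.pyRange 0 p 1).map (fun a => (PySem.List.pyRange 0 p 1).countP (pvSymB p a))).sum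
        + (PySem.List.pyRange 0 p 1).countP (pvSkewB p) := by
  unfold pvT
  rw [List.countP_flatMap]
  have step2 : ∀ a ∈ PySem.List.pyRange 0 p 1,
      (List.countP (pvCondB p) ∘ fun a =>
        (PySem.List.pyRange 0 p 1).flatMap (fun b => (PySem.List.pyRange 0 p 1).map fun c => (a, b, c))) a
      = (PySem.List.pyRange 0 p 1).countP (pvSymB p a) +
        (if a = 0 then (PySem.List.pyRange 0 p 1).countP (pvSkewB p) else 0) := by
    intro a _
    simp only [Function.comp_apply]
    rw [List.countP_flatMap]
    have hmap : ∀ b ∈ PySem.List.pyRange 0 p 1,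
        (List.countP (pvCondB p) ∘ fun b => (PySem.List.pyRange 0 p 1).map fun c => (a, b, c)) b =
        (if pvSymB p a b = true then 1 else 0) + (if a = 0 ∧ pvSkewB p b = true then 1 else 0) := by
      intro b hb
      have hbb := PySem.List.mem_pyRange_one.mp hb
      simp only [Function.comp_apply, List.countP_map]
      rw [show ((pvCondB p ∘ fun c => (a, b, c)) = fun c => pvCondB p (a, b, c)) from rfl]
      exact pvInner p hp a b hbb.1 hbb.2
    rw [List.map_congr_left hmap, List.sum_map_add]
    congr 1
    · rw [PySem.List.sum_map_ite_one_zero_nat]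
    · by_cases ha : a = 0
      · subst ha
        rw [if_pos rfl]
        simp only [true_and]
        rw [PySem.List.sum_map_ite_one_zero_nat]
      · rw [if_neg ha]
        apply List.sum_eq_zero
        intro y hy
        rcases List.mem_map.mp hy with ⟨b, _, rfl⟩
        rw [if_neg (fun hc => ha hc.1)]
  rw [List.map_congr_left step2, List.sum_map_add]
  congr 1
  have h0mem : (0 : Int) ∈ PySem.List.pyRange 0 p 1 :=
    PySem.List.mem_pyRange_one.mpr ⟨le_refl 0, hp⟩
  exact pvSum_ite_zero _ (PySem.List.nodup_pyRange_one 0 p) h0mem _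

-- B as counts
lemma pvB_count (p : Int) (hp : 0 < p) :
    solve_part_a_alt p =
      ((PySem.List.pyRange 0 p 1).map (fun a => ((PySem.List.pyRange 0 p 1).countP (pvSymB p a) : Int))).sum
        + ((PySem.List.pyRange 0 p 1).countP (pvSkewB p) : Int) := by
  unfold solve_part_a_alt
  rw [if_neg (by omega)]
  have hinner : (fun (cnt : Int) (a : Int) =>
      (PySem.List.pyRange 0 p 1).foldl (fun cnt b =>
        if PySem.Int.mod (a * a - b * b) p = 0 then cnt + 1 else cnt) cnt)
      = (fun cnt a => cnt + ((PySem.List.pyRange 0 p 1).countP (pvSymB p a) : Int)) := by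
    funext cnt a
    have hfn : (fun (cnt : Int) (b : Int) =>
        if PySem.Int.mod (a * a - b * b) p = 0 then cnt + 1 else cnt)
        = (fun cnt b => if pvSymB p a b = true then cnt + 1 else cnt) := by
      funext cnt b
      by_cases h : PySem.Int.mod (a * a - b * b) p = 0 <;> simp [pvSymB, h]
    rw [hfn, PySem.List.foldl_count_if]
  rw [hinner, PySem.List.foldl_add]
  have hfn2 : (fun (cnt : Int) (b : Int) =>
      let c := PySem.Int.mod (-b) p
      if c ≠ b ∧ PySem.Int.mod (b * c) p = 0 then cnt + 1 else cnt)
      = (fun cnt b => if pvSkewB p b = true then cnt + 1 else cnt) := by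
    funext cnt b
    by_cases h : PySem.Int.mod (-b) p ≠ b ∧ PySem.Int.mod (b * PySem.Int.mod (-b) p) p = 0 <;>
      simp [pvSkewB, h]
  rw [hfn2, PySem.List.foldl_count_if]
  omega

-- ===== VERDICT (by name: the statement is the Claim_ definition above) =====
theorem solve_part_a_spec : Claim_equal_solve_part_a := by
  intro p _
  unfold Spec_solve_part_a
  rw [pvA_count]
  by_cases hp : p ≤ 0
  · rw [solve_part_a_alt, if_pos hp]
    rw [pvT, PySem.List.pyRange_one_eq_nil hp]
    simp
  · push_cast [pvMain p (by omega), pvB_count p (by omega)]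
    rw [List.map_map]
    rfl
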